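-- pv_equiv track=rewrite | github.com/npc-strider/minecraft-ore-analysis | graph.py | list_distribution
-- ===== SOURCE A (Python) =====
-- def list_distribution(blocks, data):
--     slices = []
--     for yslice in data:
--         c = 0
--         for block in blocks.split('||'):
--             if block in yslice: c += yslice[block]
--         slices.append(c)
--     return slices
-- ===== SOURCE B (Python) =====
-- def list_distribution(blocks, data):
--     mult = {}
--     for b in blocks.split('||'):
--         mult[b] = mult.get(b, 0) + 1
--     return [sum(v * mult[k] for k, v in yslice.items() if k in mult)
--             for yslice in data]
-- ===== Notes on version B (the rewrite author's own statement) =====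
-- stated objective: idiomatic
-- what changed: B builds a multiplicity map of the requested block names once and drives the inner loop over each slice's own entries (v * mult[k]), instead of re-splitting the string and scanning the whole block list inside every slice.
import Mathlib
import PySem

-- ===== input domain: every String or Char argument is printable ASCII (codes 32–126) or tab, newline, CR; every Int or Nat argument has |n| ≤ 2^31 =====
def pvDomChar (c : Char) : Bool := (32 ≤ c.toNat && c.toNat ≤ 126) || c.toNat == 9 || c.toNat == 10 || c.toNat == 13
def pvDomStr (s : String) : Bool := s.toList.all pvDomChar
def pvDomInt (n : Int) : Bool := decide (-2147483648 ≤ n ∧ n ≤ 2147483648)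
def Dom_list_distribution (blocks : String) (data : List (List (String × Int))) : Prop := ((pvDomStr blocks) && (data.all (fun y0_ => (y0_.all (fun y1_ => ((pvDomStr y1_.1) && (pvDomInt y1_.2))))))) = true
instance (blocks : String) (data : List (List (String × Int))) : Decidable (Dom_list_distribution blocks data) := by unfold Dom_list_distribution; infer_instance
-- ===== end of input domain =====

-- B builds the block-name multiplicity map once and sums each slice over its own entries (idiomatic restructuring, same results).


-- ===== PORT A =====
def list_distribution (blocks : String) (data : List (List (String × Int))) : List Int :=
  data.foldl (fun slices yslice =>
    slices ++ [((PySem.Str.split? blocks "||").getD []).foldl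
      (fun c block =>
        if (yslice.lookup block).isSome then c + (yslice.lookup block).getD 0 else c) 0]) []

-- ===== PORT B =====
def list_distribution_alt (blocks : String) (data : List (List (String × Int))) : List Int :=
  let mult := ((PySem.Str.split? blocks "||").getD []).foldl
    (fun d b => d.insert b (d.getD b 0 + 1)) PySem.Dict.empty
  data.map (fun yslice =>
    yslice.foldl (fun s kv =>
      if (mult.get? kv.1).isSome then s + kv.2 * mult.getD kv.1 0 else s) 0)

-- ===== PRECONDITION & SPEC =====
-- Pre_ requires each y-slice's keys to be distinct: slices are Python dicts, which never
-- carry duplicate keys, so this excludes no input the Python A is ever run on.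
def Pre_list_distribution (blocks : String) (data : List (List (String × Int))) : Prop :=
  ∀ yslice ∈ data, (yslice.map Prod.fst).Nodup
instance (blocks : String) (data : List (List (String × Int))) : Decidable (Pre_list_distribution blocks data) := by unfold Pre_list_distribution; infer_instance
def pvWitness_list_distribution : String × (List (List (String × Int))) :=
  ("coal_ore||iron_ore||coal_ore", [[("coal_ore", 3), ("dirt", 5)], [], [("iron_ore", 2)]])
def Spec_list_distribution (blocks : String) (data : List (List (String × Int))) (out : List Int) : Prop := out = list_distribution_alt blocks data
instance (blocks : String) (data : List (List (String × Int))) (out : List Int) : Decidable (Spec_list_distribution blocks data out) := by unfold Spec_list_distribution; infer_instance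

-- ===== CLAIM (what is proved, stated in full; the proofs are below) =====
def Claim_equal_list_distribution : Prop := ∀ (blocks : String) (data : List (List (String × Int))), Dom_list_distribution blocks data → Pre_list_distribution blocks data → Spec_list_distribution blocks data (list_distribution blocks data)

-- ===== LEMMAS AND PROOFS =====

-- A's inner loop is a sum of defaulted lookups over the split list.
theorem foldA_eq_sum (L : List String) (ys : List (String × Int)) (c : Int) :
    L.foldl (fun c block =>
        if (ys.lookup block).isSome then c + (ys.lookup block).getD 0 else c) c
      = c + (L.map (fun b => (ys.lookup b).getD 0)).sum := by
  induction L generalizing c with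
  | nil => simp
  | cons b L ih =>
    simp only [List.foldl_cons, List.map_cons, List.sum_cons, ih]
    cases h : ys.lookup b with
    | none => simp [h]
    | some v => simp [h]; ring

-- B's inner loop is a sum of value × multiplicity over the slice's entries.
theorem foldB_eq_sum (ys : List (String × Int)) (mult : PySem.Dict String Int) (s : Int) :
    ys.foldl (fun s kv =>
        if (mult.get? kv.1).isSome then s + kv.2 * mult.getD kv.1 0 else s) s
      = s + (ys.map (fun kv => kv.2 * mult.getD kv.1 0)).sum := by
  induction ys generalizing s with
  | nil => simp
  | cons kv ys ih =>
    simp only [List.foldl_cons, List.map_cons, List.sum_cons, ih]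
    cases h : mult.get? kv.1 with
    | none =>
      have h0 : mult.getD kv.1 0 = 0 := by
        rw [PySem.Dict.getD_eq_get?_getD, h]; rfl
      simp [h0]
    | some v => simp; ring

-- A key absent from the slice's key list looks up to none.
theorem lookup_eq_none_of_not_mem (ys : List (String × Int)) (k : String)
    (hk : k ∉ ys.map Prod.fst) : ys.lookup k = none := by
  induction ys with
  | nil => rfl
  | cons kv ys ih =>
    simp only [List.map_cons, List.mem_cons, not_or] at hk
    have hb : (k == kv.1) = false := beq_eq_false_iff_ne.mpr hk.1
    simp [List.lookup, hb, ih hk.2]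

-- A sum of (if b = k then x else g b) splits off x once per occurrence of k, provided g k = 0.
theorem sum_map_ite_key (L : List String) (k : String) (x : Int) (g : String → Int)
    (hg : g k = 0) :
    (L.map (fun b => if b = k then x else g b)).sum
      = x * (L.count k : Int) + (L.map g).sum := by
  induction L with
  | nil => simp
  | cons b L ih =>
    by_cases hb : b = k
    · subst hb
      simp [ih, hg]
      ring
    · simp [hb, ih]
      ring

-- Core exchange: summing yslice[b] over the block list equals summing v·count(k) over the slice,
-- when the slice's keys are distinct.
theorem sum_lookup_eq_sum_count (L : List String) (ys : List (String × Int))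
    (hnd : (ys.map Prod.fst).Nodup) :
    (L.map (fun b => (ys.lookup b).getD 0)).sum
      = (ys.map (fun kv => kv.2 * (L.count kv.1 : Int))).sum := by
  induction ys with
  | nil => simp [List.lookup]
  | cons kv ys ih =>
    obtain ⟨k, v⟩ := kv
    simp only [List.map_cons, List.nodup_cons] at hnd
    obtain ⟨hk, hnd'⟩ := hnd
    have hrest : ys.lookup k = none := lookup_eq_none_of_not_mem ys k hk
    have hstep : ∀ b : String,
        ((((k, v) :: ys).lookup b).getD 0) = if b = k then v else (ys.lookup b).getD 0 := by
      intro b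
      by_cases hb : b = k
      · simp [List.lookup, hb]
      · have hbf : (b == k) = false := beq_eq_false_iff_ne.mpr hb
        simp [List.lookup, hbf, hb]
    calc (L.map (fun b => (((k, v) :: ys).lookup b).getD 0)).sum
        = (L.map (fun b => if b = k then v else (ys.lookup b).getD 0)).sum := by
          simp only [hstep]
      _ = v * (L.count k : Int) + (L.map (fun b => (ys.lookup b).getD 0)).sum := by
          apply sum_map_ite_key
          simp [hrest]
      _ = (((k, v) :: ys).map (fun kv => kv.2 * (L.count kv.1 : Int))).sum := by
          simp [ih hnd']

-- The two inner loops agree on a slice with distinct keys.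
theorem inner_eq (L : List String) (ys : List (String × Int))
    (hnd : (ys.map Prod.fst).Nodup) :
    L.foldl (fun c block =>
        if (ys.lookup block).isSome then c + (ys.lookup block).getD 0 else c) 0
      = ys.foldl (fun s kv =>
          if ((L.foldl (fun d b => d.insert b (d.getD b 0 + 1)) (PySem.Dict.empty : PySem.Dict String Int)).get? kv.1).isSome
          then s + kv.2 * (L.foldl (fun d b => d.insert b (d.getD b 0 + 1)) (PySem.Dict.empty : PySem.Dict String Int)).getD kv.1 0
          else s) 0 := by
  have hB := foldB_eq_sum ys (L.foldl (fun d b => d.insert b (d.getD b 0 + 1)) (PySem.Dict.empty : PySem.Dict String Int)) 0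
  rw [hB, foldA_eq_sum, sum_lookup_eq_sum_count L ys hnd]
  have hmult : ∀ k : String,
      (L.foldl (fun d b => d.insert b (d.getD b 0 + 1)) (PySem.Dict.empty : PySem.Dict String Int)).getD k 0
        = (L.count k : Int) := by
    intro k
    rw [PySem.Dict.getD_foldl_insert_add_one]
    simp
  simp only [hmult]

-- ===== VERDICT (by name: the statement is the Claim_ definition above) =====
theorem list_distribution_spec : Claim_equal_list_distribution := by
  intro blocks data _hdom hpre
  unfold Spec_list_distribution list_distribution list_distribution_alt
  rw [PySem.List.foldl_append_singleton_eq_map]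
  apply List.map_congr_left
  intro ys hys
  exact inner_eq _ ys (hpre ys hys)
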